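-- pv_equiv track=rewrite | github.com/pascaldisse/open-sourcefy | src/ml/semantic_analyzer.py | _determine_function_purpose
-- ===== SOURCE A (Python) =====
-- from typing import Dict, List, Optional, Tuple, Any, Union, Set
--
-- def _determine_function_purpose(code: str, characteristics: Dict[str, Any]) -> str:
--     """Determine the primary purpose of a function"""
--     function_calls = characteristics.get('function_calls', [])
--     keywords = characteristics.get('keywords', [])
--
--     # Categorize based on function calls and keywords
--     if any(call in ['malloc', 'calloc', 'new'] for call in function_calls):
--         return "memory_allocation"
--     elif any(call in ['free', 'delete'] for call in function_calls):
--         return "memory_deallocation"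
--     elif any(call in ['strcpy', 'strlen', 'strcmp'] for call in function_calls):
--         return "string_processing"
--     elif any(call in ['printf', 'fprintf', 'puts'] for call in function_calls):
--         return "output_operation"
--     elif any(call in ['scanf', 'fgets', 'getchar'] for call in function_calls):
--         return "input_operation"
--     elif any(call in ['memcpy', 'memset', 'memcmp'] for call in function_calls):
--         return "memory_operation"
--     elif 'return' in code and ('0' in code or '1' in code or 'true' in code or 'false' in code):
--         return "validation_check"
--     elif len(characteristics.get('control_structures', [])) > 2:
--         return "complex_logic"
--     else:
--         return "data_processing"
-- ===== SOURCE B (Python) =====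
-- _TRIGGERS = {
--     'malloc': 0, 'calloc': 0, 'new': 0,
--     'free': 1, 'delete': 1,
--     'strcpy': 2, 'strlen': 2, 'strcmp': 2,
--     'printf': 3, 'fprintf': 3, 'puts': 3,
--     'scanf': 4, 'fgets': 4, 'getchar': 4,
--     'memcpy': 5, 'memset': 5, 'memcmp': 5,
-- }
-- _CATS = ["memory_allocation", "memory_deallocation", "string_processing",
--          "output_operation", "input_operation", "memory_operation"]
--
-- def _determine_function_purpose(code, characteristics):
--     """Single pass over function_calls keeping the lowest-priority trigger."""
--     best = None
--     for call in characteristics.get('function_calls', []):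
--         p = _TRIGGERS.get(call)
--         if p is not None and (best is None or p < best):
--             best = p
--     if best is not None:
--         return _CATS[best]
--     if 'return' in code and ('0' in code or '1' in code or 'true' in code or 'false' in code):
--         return "validation_check"
--     if len(characteristics.get('control_structures', [])) > 2:
--         return "complex_logic"
--     return "data_processing"
-- ===== Notes on version B (the rewrite author's own statement) =====
-- stated objective: alternative
-- what changed: Replaced six sequential any-scans over function_calls by a trigger-name-to-priority dict built once and a single min-tracking pass; the fallback branches are unchanged.
import Mathlib
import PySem

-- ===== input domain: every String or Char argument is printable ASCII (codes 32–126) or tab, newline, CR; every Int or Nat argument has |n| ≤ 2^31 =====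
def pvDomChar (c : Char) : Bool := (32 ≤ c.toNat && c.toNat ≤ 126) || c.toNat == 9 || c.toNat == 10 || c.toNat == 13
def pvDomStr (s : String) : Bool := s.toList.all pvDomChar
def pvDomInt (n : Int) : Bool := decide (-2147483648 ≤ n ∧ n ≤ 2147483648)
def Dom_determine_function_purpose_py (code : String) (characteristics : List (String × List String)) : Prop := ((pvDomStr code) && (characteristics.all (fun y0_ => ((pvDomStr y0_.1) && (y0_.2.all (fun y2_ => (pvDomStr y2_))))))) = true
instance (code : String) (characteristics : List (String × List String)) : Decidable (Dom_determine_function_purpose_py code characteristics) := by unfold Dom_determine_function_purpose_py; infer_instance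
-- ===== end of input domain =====

-- B replaces A's six priority-ordered any-scans over function_calls by a trigger→priority
-- dict built once and one min-tracking pass (objective: alternative decomposition, same cost class).

-- ===== PORT A =====
def determine_function_purpose_py (code : String) (characteristics : List (String × List String)) : String :=
  let function_calls := (PySem.Dict.mk characteristics).getD "function_calls" []
  let _keywords := (PySem.Dict.mk characteristics).getD "keywords" []
  if function_calls.any (fun call => decide (call ∈ ["malloc", "calloc", "new"])) then "memory_allocation"
  else if function_calls.any (fun call => decide (call ∈ ["free", "delete"])) then "memory_deallocation"
  else if function_calls.any (fun call => decide (call ∈ ["strcpy", "strlen", "strcmp"])) then "string_processing"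
  else if function_calls.any (fun call => decide (call ∈ ["printf", "fprintf", "puts"])) then "output_operation"
  else if function_calls.any (fun call => decide (call ∈ ["scanf", "fgets", "getchar"])) then "input_operation"
  else if function_calls.any (fun call => decide (call ∈ ["memcpy", "memset", "memcmp"])) then "memory_operation"
  else if PySem.Str.isIn "return" code && (PySem.Str.isIn "0" code || PySem.Str.isIn "1" code || PySem.Str.isIn "true" code || PySem.Str.isIn "false" code) then "validation_check"
  else if ((PySem.Dict.mk characteristics).getD "control_structures" []).length > 2 then "complex_logic"
  else "data_processing"

-- ===== PORT B =====
def pvTriggers : PySem.Dict String Nat := PySem.Dict.ofList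
  [("malloc", 0), ("calloc", 0), ("new", 0),
   ("free", 1), ("delete", 1),
   ("strcpy", 2), ("strlen", 2), ("strcmp", 2),
   ("printf", 3), ("fprintf", 3), ("puts", 3),
   ("scanf", 4), ("fgets", 4), ("getchar", 4),
   ("memcpy", 5), ("memset", 5), ("memcmp", 5)]

def pvCats : List String :=
  ["memory_allocation", "memory_deallocation", "string_processing",
   "output_operation", "input_operation", "memory_operation"]

-- the loop body: 'p = _TRIGGERS.get(call); if p is not None and (best is None or p < best): best = p'
def pvStep (best : Option Nat) (call : String) : Option Nat :=
  match pvTriggers.get? call with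
  | none => best
  | some p =>
    match best with
    | none => some p
    | some b => if p < b then some p else best

def determine_function_purpose_py_alt (code : String) (characteristics : List (String × List String)) : String :=
  let best := ((PySem.Dict.mk characteristics).getD "function_calls" []).foldl pvStep none
  match best with
  | some b => pvCats.getD b ""   -- _CATS[best]; best is always < 6 here
  | none =>
    if PySem.Str.isIn "return" code && (PySem.Str.isIn "0" code || PySem.Str.isIn "1" code || PySem.Str.isIn "true" code || PySem.Str.isIn "false" code) then "validation_check"
    else if ((PySem.Dict.mk characteristics).getD "control_structures" []).length > 2 then "complex_logic"
    else "data_processing"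

-- ===== PRECONDITION & SPEC =====
def Spec_determine_function_purpose_py (code : String) (characteristics : List (String × List String)) (out : String) : Prop := out = determine_function_purpose_py_alt code characteristics
instance (code : String) (characteristics : List (String × List String)) (out : String) : Decidable (Spec_determine_function_purpose_py code characteristics out) := by unfold Spec_determine_function_purpose_py; infer_instance

-- ===== CLAIM (what is proved, stated in full; the proofs are below) =====
def Claim_equal_determine_function_purpose_py : Prop := ∀ (code : String) (characteristics : List (String × List String)), Dom_determine_function_purpose_py code characteristics → Spec_determine_function_purpose_py code characteristics (determine_function_purpose_py code characteristics)

-- ===== LEMMAS AND PROOFS =====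

-- Option-valued minimum (none = "no trigger seen yet")
def pvOmin : Option Nat → Option Nat → Option Nat
  | none, b => b
  | some a, none => some a
  | some a, some b => some (min a b)

theorem pvOmin_none_left (b : Option Nat) : pvOmin none b = b := rfl

theorem pvOmin_assoc (a b c : Option Nat) : pvOmin (pvOmin a b) c = pvOmin a (pvOmin b c) := by
  cases a <;> cases b <;> cases c <;> simp [pvOmin, min_assoc]

theorem pvStep_eq (acc : Option Nat) (c : String) :
    pvStep acc c = pvOmin acc (pvTriggers.get? c) := by
  unfold pvStep
  cases h : pvTriggers.get? c <;> cases acc <;> simp [pvOmin]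
  split_ifs <;> simp <;> omega

theorem pvFoldl_omin (l : List String) (acc : Option Nat) :
    l.foldl pvStep acc = pvOmin acc (l.foldl pvStep none) := by
  induction l generalizing acc with
  | nil => cases acc <;> simp [pvOmin]
  | cons c cs ih =>
    simp only [List.foldl_cons]
    rw [ih (pvStep acc c), ih (pvStep none c), pvStep_eq, pvStep_eq, pvOmin_none_left,
        pvOmin_assoc]

-- what a get? in the trigger dict means, written as A's priority chain
set_option maxHeartbeats 2000000 in
theorem pvBridge (c : String) : pvTriggers.get? c =
    (if c ∈ ["malloc", "calloc", "new"] then some 0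
     else if c ∈ ["free", "delete"] then some 1
     else if c ∈ ["strcpy", "strlen", "strcmp"] then some 2
     else if c ∈ ["printf", "fprintf", "puts"] then some 3
     else if c ∈ ["scanf", "fgets", "getchar"] then some 4
     else if c ∈ ["memcpy", "memset", "memcmp"] then some 5
     else none) := by
  by_cases h1 : c = "malloc"
  · subst h1; decide
  by_cases h2 : c = "calloc"
  · subst h2; decide
  by_cases h3 : c = "new"
  · subst h3; decide
  by_cases h4 : c = "free"
  · subst h4; decide
  by_cases h5 : c = "delete"
  · subst h5; decide
  by_cases h6 : c = "strcpy"
  · subst h6; decide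
  by_cases h7 : c = "strlen"
  · subst h7; decide
  by_cases h8 : c = "strcmp"
  · subst h8; decide
  by_cases h9 : c = "printf"
  · subst h9; decide
  by_cases h10 : c = "fprintf"
  · subst h10; decide
  by_cases h11 : c = "puts"
  · subst h11; decide
  by_cases h12 : c = "scanf"
  · subst h12; decide
  by_cases h13 : c = "fgets"
  · subst h13; decide
  by_cases h14 : c = "getchar"
  · subst h14; decide
  by_cases h15 : c = "memcpy"
  · subst h15; decide
  by_cases h16 : c = "memset"
  · subst h16; decide
  by_cases h17 : c = "memcmp"
  · subst h17; decide
  have h : pvTriggers = PySem.Dict.mk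
      [("malloc", 0), ("calloc", 0), ("new", 0), ("free", 1), ("delete", 1),
       ("strcpy", 2), ("strlen", 2), ("strcmp", 2), ("printf", 3), ("fprintf", 3), ("puts", 3),
       ("scanf", 4), ("fgets", 4), ("getchar", 4), ("memcpy", 5), ("memset", 5), ("memcmp", 5)] := by
    decide
  rw [h]
  simp only [PySem.Dict.get?_mk_cons, beq_iff_eq]
  rw [if_neg (Ne.symm h1), if_neg (Ne.symm h2), if_neg (Ne.symm h3), if_neg (Ne.symm h4), if_neg (Ne.symm h5), if_neg (Ne.symm h6), if_neg (Ne.symm h7), if_neg (Ne.symm h8), if_neg (Ne.symm h9), if_neg (Ne.symm h10), if_neg (Ne.symm h11), if_neg (Ne.symm h12), if_neg (Ne.symm h13), if_neg (Ne.symm h14), if_neg (Ne.symm h15), if_neg (Ne.symm h16), if_neg (Ne.symm h17)]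
  simp [PySem.Dict.get?, h1, h2, h3, h4, h5, h6, h7, h8, h9, h10, h11, h12, h13, h14, h15, h16, h17]

-- A's six scans, as an Option-valued chain
def pvChainO (calls : List String) : Option Nat :=
  if calls.any (fun call => decide (call ∈ ["malloc", "calloc", "new"])) then some 0
  else if calls.any (fun call => decide (call ∈ ["free", "delete"])) then some 1
  else if calls.any (fun call => decide (call ∈ ["strcpy", "strlen", "strcmp"])) then some 2
  else if calls.any (fun call => decide (call ∈ ["printf", "fprintf", "puts"])) then some 3
  else if calls.any (fun call => decide (call ∈ ["scanf", "fgets", "getchar"])) then some 4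
  else if calls.any (fun call => decide (call ∈ ["memcpy", "memset", "memcmp"])) then some 5
  else none

set_option maxHeartbeats 2000000 in
theorem pvLoop_eq_chain (calls : List String) : calls.foldl pvStep none = pvChainO calls := by
  induction calls with
  | nil => simp [pvChainO]
  | cons c cs ih =>
    rw [List.foldl_cons, pvFoldl_omin, ih, pvStep_eq, pvOmin_none_left, pvBridge]
    unfold pvChainO
    simp only [List.any_cons, Bool.or_eq_true, decide_eq_true_eq]
    split_ifs <;> first | rfl | decide | tauto

-- the Option-dispatch of a priority chain is A's string chain
theorem pvDispatch_chain (b0 b1 b2 b3 b4 b5 : Bool) (F : String) :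
    (match (if b0 then some 0 else if b1 then some 1 else if b2 then some 2
            else if b3 then some 3 else if b4 then some 4 else if b5 then some (5 : Nat)
            else none) with
     | some b => pvCats.getD b ""
     | none => F) =
    (if b0 then "memory_allocation" else if b1 then "memory_deallocation"
     else if b2 then "string_processing" else if b3 then "output_operation"
     else if b4 then "input_operation" else if b5 then "memory_operation" else F) := by
  cases b0 <;> cases b1 <;> cases b2 <;> cases b3 <;> cases b4 <;> cases b5 <;> rfl

-- ===== VERDICT (by name: the statement is the Claim_ definition above) =====
theorem determine_function_purpose_py_spec : Claim_equal_determine_function_purpose_py := by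
  intro code characteristics _
  unfold Spec_determine_function_purpose_py determine_function_purpose_py determine_function_purpose_py_alt
  rw [pvLoop_eq_chain]
  unfold pvChainO
  rw [pvDispatch_chain]
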